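-- pv_equiv track=rewrite | github.com/aksharjoshi/practice_problem | amazon_problems/lengthScene.py | lengthEachScene
-- ===== SOURCE A (Python) =====
-- def lengthEachScene(inputList):
--     # WRITE YOUR CODE HERE
--     dict_map = {}
--
--     for i in range(0, len(inputList)):
--         dict_map[inputList[i]] = i
--
--     final_res = []
--
--     left = right = 0
--
--     for i in range(0, len(inputList)):
--         right = max(right, dict_map[inputList[i]])
--         if right == i:
--             final_res.append(1 + right - left)
--             left = right + 1
--     return final_res
-- ===== SOURCE B (Python) =====
-- def lengthEachScene(inputList):
--     # Declarative reformulation: a scene boundary sits after position i exactly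
--     # when no element of the prefix reappears in the suffix; scene lengths are
--     # the gaps between consecutive boundaries.
--     n = len(inputList)
--     cuts = [i for i in range(n)
--             if set(inputList[:i + 1]).isdisjoint(inputList[i + 1:])]
--     return [c - p for c, p in zip(cuts, [-1] + cuts)]
-- ===== Notes on version B (the rewrite author's own statement) =====
-- stated objective: alternative
-- what changed: A's single greedy scan with a last-occurrence dict and running left/right pointers is replaced by a declarative cut-list formulation: a boundary sits after index i exactly when the prefix and suffix share no element, and the result is the list of gaps between consecutive boundaries.
import Mathlib
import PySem

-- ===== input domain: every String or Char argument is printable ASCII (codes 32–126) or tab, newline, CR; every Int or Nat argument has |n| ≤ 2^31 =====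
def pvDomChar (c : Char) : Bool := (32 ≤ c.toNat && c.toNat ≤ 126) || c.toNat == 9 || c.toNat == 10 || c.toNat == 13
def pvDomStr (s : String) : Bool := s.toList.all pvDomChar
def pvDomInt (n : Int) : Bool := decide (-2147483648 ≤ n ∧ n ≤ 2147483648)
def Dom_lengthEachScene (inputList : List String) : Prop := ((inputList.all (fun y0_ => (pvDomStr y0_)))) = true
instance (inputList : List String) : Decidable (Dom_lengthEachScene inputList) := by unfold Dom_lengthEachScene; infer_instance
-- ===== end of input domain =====

-- B replaces A's running-max greedy scan by a declarative cut-list formulation (a boundary sits after i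
-- exactly when prefix and suffix are disjoint; lengths are pairwise gaps); alternative decomposition, not faster.

-- ===== PORT A =====
def lengthEachScene (inputList : List String) : List Int :=
  let dictMap : PySem.Dict String Int :=
    (PySem.List.pyRange 0 (inputList.length : Int) 1).foldl
      (fun d i => d.insert (PySem.List.pyGetD inputList i "") i) PySem.Dict.empty
  let st :=
    (PySem.List.pyRange 0 (inputList.length : Int) 1).foldl
      (fun (st : Int × Int × List Int) i =>
        -- dict_map[inputList[i]]: the key is always present, so getD's default 0 is never read (no KeyError)
        let right := max st.1 (dictMap.getD (PySem.List.pyGetD inputList i "") 0)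
        if right == i then (right, right + 1, st.2.2 ++ [1 + right - st.2.1])
        else (right, st.2.1, st.2.2))
      (0, 0, [])
  st.2.2

-- ===== PORT B =====
def lengthEachScene_alt (inputList : List String) : List Int :=
  let n : Int := inputList.length
  let cuts : List Int :=
    (PySem.List.pyRange 0 n 1).filter (fun i =>
      PySem.Set.isdisjoint (PySem.Set.ofList (PySem.List.slice inputList none (some (i + 1))))
        (PySem.List.slice inputList (some (i + 1)) none))
  (cuts.zip ((-1) :: cuts)).map (fun cp => cp.1 - cp.2)

-- ===== PRECONDITION & SPEC =====
def Spec_lengthEachScene (inputList : List String) (out : List Int) : Prop := out = lengthEachScene_alt inputList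
instance (inputList : List String) (out : List Int) : Decidable (Spec_lengthEachScene inputList out) := by unfold Spec_lengthEachScene; infer_instance

-- ===== CLAIM (what is proved, stated in full; the proofs are below) =====
def Claim_equal_lengthEachScene : Prop := ∀ (inputList : List String), Dom_lengthEachScene inputList → Spec_lengthEachScene inputList (lengthEachScene inputList)

-- ===== LEMMAS AND PROOFS =====

-- index of the LAST occurrence of x in l (none when x ∉ l)
def lastIdx? : List String → String → Option Nat
  | [], _ => none
  | a :: t, x =>
    match lastIdx? t x with
    | some k => some (k + 1)
    | none => if a = x then some 0 else none

lemma lastIdx?_append_singleton (s : List String) (a x : String) :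
    lastIdx? (s ++ [a]) x = if a = x then some s.length else lastIdx? s x := by
  induction s with
  | nil => simp [lastIdx?]
  | cons b s ih =>
    simp only [List.cons_append, lastIdx?, ih]
    by_cases h : a = x
    · simp [h]
    · simp only [h, if_false]

lemma lastIdx?_of_mem (s : List String) (x : String) (h : x ∈ s) :
    ∃ p, lastIdx? s x = some p := by
  induction s with
  | nil => simp at h
  | cons b s ih =>
    simp only [lastIdx?]
    cases hel : lastIdx? s x with
    | some k => exact ⟨k + 1, rfl⟩
    | none =>
      have hbx : b = x := by
        rcases List.mem_cons.mp h with h | h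
        · exact h.symm
        · obtain ⟨p, hp⟩ := ih h; simp [hp] at hel
      simp [hbx]

lemma lastIdx?_spec (s : List String) (x : String) (p : Nat) (h : lastIdx? s x = some p) :
    p < s.length ∧ s[p]? = some x ∧ ∀ q, q < s.length → s[q]? = some x → q ≤ p := by
  induction s generalizing p with
  | nil => simp [lastIdx?] at h
  | cons b s ih =>
    simp only [lastIdx?] at h
    cases hel : lastIdx? s x with
    | some k =>
      rw [hel] at h
      obtain ⟨hk, hx, hmax⟩ := ih k hel
      simp only [Option.some.injEq] at h
      subst h
      refine ⟨by simpa using Nat.succ_lt_succ hk, by simpa using hx, ?_⟩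
      rintro (_ | q) hq hxq
      · omega
      · have := hmax q (by simpa using hq) (by simpa using hxq); omega
    | none =>
      rw [hel] at h
      have hnm : x ∉ s := by
        intro hm
        obtain ⟨p', hp'⟩ := lastIdx?_of_mem s x hm
        simp [hp'] at hel
      split_ifs at h with hb
      · obtain rfl : (0 : Nat) = p := by simpa using h
        refine ⟨by simp, by simpa using hb, ?_⟩
        rintro (_ | q) hq hxq
        · omega
        · exact absurd (List.mem_of_getElem? (by simpa using hxq)) hnm

-- the dict built by A's first loop
def dictOf (t : List String) : PySem.Dict String Int :=
  (PySem.List.enumerate t 0).foldl (fun d p => d.insert p.2 p.1) PySem.Dict.empty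

lemma dictOf_get? (t : List String) (x : String) :
    (dictOf t).get? x = (lastIdx? t x).map (fun k => (k : Int)) := by
  induction t using List.reverseRecOn with
  | nil => simp [dictOf, lastIdx?, PySem.List.enumerate_nil]
  | append_singleton s a ih =>
    have hd : dictOf (s ++ [a]) = (dictOf s).insert a (s.length : Int) := by
      simp [dictOf, PySem.List.enumerate_append, PySem.List.enumerate_cons,
        PySem.List.enumerate_nil]
    rw [hd, PySem.Dict.get?_insert, lastIdx?_append_singleton]
    by_cases hax : a = x
    · simp [hax]
    · simp [hax, Ne.symm hax, ih]

def gD (t : List String) (x : String) : Int := (dictOf t).getD x 0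

-- gD on a member of t is the index of its last occurrence
lemma gD_spec (t : List String) (x : String) (hx : x ∈ t) :
    ∃ p : Nat, gD t x = (p : Int) ∧ p < t.length ∧ t[p]? = some x ∧
      ∀ q, q < t.length → t[q]? = some x → q ≤ p := by
  obtain ⟨p, hp⟩ := lastIdx?_of_mem t x hx
  obtain ⟨h1, h2, h3⟩ := lastIdx?_spec t x p hp
  refine ⟨p, ?_, h1, h2, h3⟩
  rw [gD, PySem.Dict.getD_eq_get?_getD, dictOf_get?, hp]
  rfl

def runMax (t : List String) (m : Nat) : Int :=
  (t.take m).foldl (fun acc x => max acc (gD t x)) 0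

def cutsPre (t : List String) (m : Nat) : List Int :=
  (PySem.List.pyRange 0 (m : Int) 1).filter (fun i => runMax t (i.toNat + 1) == i)

def cutsOf (t : List String) : List Int :=
  (PySem.List.pyRange 0 (t.length : Int) 1).filter (fun i =>
    PySem.Set.isdisjoint (PySem.Set.ofList (t.take (i.toNat + 1))) (t.drop (i.toNat + 1)))

def diffs (c : List Int) : List Int := (c.zip ((-1) :: c)).map (fun cp => cp.1 - cp.2)

lemma zip_diff_append (c : List Int) (p v : Int) :
    ((c ++ [v]).zip (p :: (c ++ [v]))).map (fun cp => cp.1 - cp.2)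
      = (c.zip (p :: c)).map (fun cp => cp.1 - cp.2) ++ [v - c.getLastD p] := by
  induction c generalizing p with
  | nil => simp
  | cons a c ih =>
    simp only [List.cons_append, List.zip_cons_cons, List.map_cons, List.getLastD_cons]
    rw [ih a]

lemma diffs_append (c : List Int) (v : Int) :
    diffs (c ++ [v]) = diffs c ++ [v - c.getLastD (-1)] := by
  simpa [diffs] using zip_diff_append c (-1) v

lemma foldl_max_le_int {α : Type} (xs : List α) (f : α → Int) (init b : Int)
    (h0 : init ≤ b) (hall : ∀ x ∈ xs, f x ≤ b) :
    xs.foldl (fun a x => max a (f x)) init ≤ b := by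
  induction xs generalizing init with
  | nil => simpa using h0
  | cons a xs ih =>
    exact ih (max init (f a)) (by
      have := hall a (by simp); omega) (fun x hx => hall x (by simp [hx]))

lemma runMax_succ (t : List String) (m : Nat) (hm : m < t.length) :
    runMax t (m + 1) = max (runMax t m) (gD t t[m]) := by
  unfold runMax
  rw [List.take_add_one, List.getElem?_eq_getElem hm]
  simp only [Option.toList_some, List.foldl_append, List.foldl_cons, List.foldl_nil]

lemma cutsPre_succ (t : List String) (m : Nat) :
    cutsPre t (m + 1)
      = cutsPre t m ++ (if runMax t (m + 1) == (m : Int) then [(m : Int)] else []) := by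
  unfold cutsPre
  have : ((m + 1 : Nat) : Int) = (m : Int) + 1 := by push_cast; ring
  rw [this, PySem.List.pyRange_one_succ_right (by positivity), List.filter_append]
  simp only [List.filter, Int.toNat_natCast]
  by_cases h : runMax t (m + 1) = (m : Int)
  · simp [h]
  · have hb : (runMax t (m + 1) == (m : Int)) = false := by simpa using h
    simp [hb]

lemma scanA_invariant (t : List String) (m : Nat) (hm : m ≤ t.length) :
    ((PySem.List.enumerate t 0).take m).foldl
      (fun (st : Int × Int × List Int) p =>
        let right := max st.1 (gD t p.2)
        if right == p.1 then (right, right + 1, st.2.2 ++ [1 + right - st.2.1])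
        else (right, st.2.1, st.2.2))
      (0, 0, [])
    = (runMax t m, (cutsPre t m).getLastD (-1) + 1, diffs (cutsPre t m)) := by
  induction m with
  | zero => simp [runMax, cutsPre, diffs]
  | succ m ih =>
    have hmlt : m < t.length := by omega
    rw [List.take_add_one, PySem.List.getElem?_enumerate, List.getElem?_eq_getElem hmlt,
      List.foldl_append, ih (by omega)]
    simp only [Option.map_some, Option.toList_some, List.foldl_cons, List.foldl_nil, zero_add]
    rw [← runMax_succ t m hmlt, cutsPre_succ t m]
    by_cases h : runMax t (m + 1) = (m : Int)
    · simp only [h, beq_self_eq_true, if_true]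
      have hlast : ((cutsPre t m) ++ [(m : Int)]).getLastD (-1) = (m : Int) := by
        simp [List.getLastD_eq_getLast?]
      rw [diffs_append, hlast]
      refine congrArg₂ Prod.mk rfl (congrArg₂ Prod.mk rfl ?_)
      have harith : 1 + (m : Int) - ((cutsPre t m).getLastD (-1) + 1)
          = (m : Int) - (cutsPre t m).getLastD (-1) := by ring
      rw [harith]
    · have hb : (runMax t (m + 1) == (m : Int)) = false := by simpa using h
      simp [hb]

lemma dict_fold_eq (t : List String) :
    (PySem.List.pyRange 0 (t.length : Int) 1).foldl
      (fun (d : PySem.Dict String Int) i => d.insert (PySem.List.pyGetD t i "") i)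
      PySem.Dict.empty = dictOf t := by
  rw [dictOf, PySem.List.enumerate_eq_map_pyRange (d := ""), List.foldl_map]
  simp

lemma A_eq_diffs (t : List String) : lengthEachScene t = diffs (cutsPre t t.length) := by
  have h1 := scanA_invariant t t.length le_rfl
  rw [List.take_of_length_le (by simp)] at h1
  rw [PySem.List.enumerate_eq_map_pyRange (d := ""), List.foldl_map] at h1
  unfold lengthEachScene
  simp only [dict_fold_eq]
  have := congrArg (fun (z : Int × Int × List Int) => z.2.2) h1
  simpa [gD] using this

-- k < |t|: "the running max of last occurrences over t[0..k] equals k" ↔ "prefix and suffix are disjoint"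
lemma key_lemma (t : List String) (k : Nat) (hk : k < t.length) :
    (runMax t (k + 1) == (k : Int))
      = PySem.Set.isdisjoint (PySem.Set.ofList (t.take (k + 1))) (t.drop (k + 1)) := by
  have hmemk : t[k] ∈ t.take (k + 1) := by
    have h1 : (t.take (k + 1))[k]'(by simp; omega) = t[k] := List.getElem_take
    exact h1 ▸ List.getElem_mem _
  have hbound := PySem.List.le_foldl_max_int (t.take (k + 1)) (gD t) 0
  rw [Bool.eq_iff_iff, beq_iff_eq, PySem.Set.isdisjoint_iff]
  have hgeK : (k : Int) ≤ runMax t (k + 1) := by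
    obtain ⟨p, hgp, hp, hxp, hmax⟩ := gD_spec t t[k] (List.getElem_mem hk)
    have h1 : k ≤ p := hmax k hk (List.getElem?_eq_getElem hk)
    have h2 := hbound.2 t[k] hmemk
    rw [hgp] at h2
    unfold runMax
    omega
  constructor
  · intro heq x hx
    rw [PySem.Set.mem_ofList] at hx
    intro hdrop
    obtain ⟨p, hgp, hp, hxp, hmax⟩ := gD_spec t x (List.mem_of_mem_take hx)
    obtain ⟨j, hj⟩ := List.mem_iff_getElem?.mp hdrop
    rw [List.getElem?_drop] at hj
    have hjlen : k + 1 + j < t.length := (List.getElem?_eq_some_iff.mp hj).1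
    have h1 : k + 1 + j ≤ p := hmax _ hjlen hj
    have h2 := hbound.2 x hx
    rw [hgp] at h2
    unfold runMax at heq
    omega
  · intro hdis
    have hle : runMax t (k + 1) ≤ (k : Int) := by
      unfold runMax
      apply foldl_max_le_int _ _ _ _ (by positivity)
      intro x hx
      obtain ⟨p, hgp, hp, hxp, hmax⟩ := gD_spec t x (List.mem_of_mem_take hx)
      rw [hgp]
      by_contra hgt
      have hxd : x ∈ t.drop (k + 1) := by
        rw [List.mem_iff_getElem?]
        refine ⟨p - (k + 1), ?_⟩
        rw [List.getElem?_drop]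
        rwa [show k + 1 + (p - (k + 1)) = p by omega]
      exact absurd hxd (hdis x (by rwa [PySem.Set.mem_ofList]))
    omega

lemma cutsPre_eq_cutsOf (t : List String) : cutsPre t t.length = cutsOf t := by
  unfold cutsPre cutsOf
  apply List.filter_congr
  intro i hi
  obtain ⟨h0, hn⟩ := (PySem.List.mem_pyRange_one).mp hi
  obtain ⟨k, rfl⟩ := Int.eq_ofNat_of_zero_le h0
  rw [Int.toNat_natCast]
  exact key_lemma t k (by exact_mod_cast hn)

lemma B_eq_diffs (t : List String) : lengthEachScene_alt t = diffs (cutsOf t) := by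
  unfold lengthEachScene_alt cutsOf diffs
  dsimp only
  have hcuts : ∀ (i : Int), i ∈ PySem.List.pyRange 0 (t.length : Int) 1 →
      (PySem.Set.isdisjoint (PySem.Set.ofList (PySem.List.slice t none (some (i + 1))))
          (PySem.List.slice t (some (i + 1)) none))
        = PySem.Set.isdisjoint (PySem.Set.ofList (t.take (i.toNat + 1))) (t.drop (i.toNat + 1)) := by
    intro i hi
    obtain ⟨h0, hn⟩ := (PySem.List.mem_pyRange_one).mp hi
    rw [PySem.List.slice_to t (b := i + 1) (by omega),
      PySem.List.slice_from t (a := i + 1) (by omega),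
      show (i + 1).toNat = i.toNat + 1 by omega]
  rw [List.filter_congr hcuts]

-- ===== VERDICT (by name: the statement is the Claim_ definition above) =====
theorem lengthEachScene_spec : Claim_equal_lengthEachScene := by
  intro t _
  show lengthEachScene t = lengthEachScene_alt t
  rw [A_eq_diffs, cutsPre_eq_cutsOf, B_eq_diffs]
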